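-- pv_equiv track=rewrite | github.com/BLZhao/CAL | analysis_results_edge.py | find_segments_bounds
-- ===== SOURCE A (Python) =====
-- def find_segments_bounds(result):
--     if not result:  # 如果result为空
--         return []
--     segments = []
--     start = 0
--     # 遍历到倒数第二个元素
--     for i in range(len(result) - 1):
--         if result[i] != result[i + 1]:  # 如果当前元素和下一个元素不相等
--             segments.append((start, i))  # 添加当前段的起止位置
--             start = i + 1
--     # 添加最后一段
--     segments.append((start, len(result) - 1))
--     return segments
-- ===== SOURCE B (Python) =====
-- def find_segments_bounds(result):
--     n = len(result)
--     starts = [i for i in range(n) if i == 0 or result[i] != result[i - 1]]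
--     return [(s, e - 1) for s, e in zip(starts, starts[1:] + [n])]
-- ===== Notes on version B (the rewrite author's own statement) =====
-- stated objective: simpler
-- what changed: Replaces the single-pass loop that carries a run-start accumulator and compares result[i] with result[i+1] by two staged declarative passes: a comprehension collecting all run-start indices (i == 0 or result[i] != result[i-1]), then zipping that list with its own shift to emit (start, next_start - 1) pairs; the empty case falls out naturally.
import Mathlib
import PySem

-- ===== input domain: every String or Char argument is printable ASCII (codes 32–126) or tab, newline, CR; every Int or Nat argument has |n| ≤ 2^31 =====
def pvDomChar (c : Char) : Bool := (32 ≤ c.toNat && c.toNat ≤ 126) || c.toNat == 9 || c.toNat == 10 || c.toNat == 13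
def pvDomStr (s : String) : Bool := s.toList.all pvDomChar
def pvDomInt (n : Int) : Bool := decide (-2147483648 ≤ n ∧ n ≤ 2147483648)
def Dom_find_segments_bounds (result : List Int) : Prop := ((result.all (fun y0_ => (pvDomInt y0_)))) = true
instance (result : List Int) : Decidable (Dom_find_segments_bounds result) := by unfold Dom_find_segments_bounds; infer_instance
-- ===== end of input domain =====

-- B replaces A's single scan with a carried run-start accumulator by two staged passes:
-- collect all run-start indices, then zip that list with its own shift; same cost, 'simpler'.

-- ===== PORT A =====
def find_segments_bounds (result : List Int) : List (Int × Int) :=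
  if result = [] then []
  else
    let n : Int := result.length
    let st := (PySem.List.pyRange 0 (n - 1) 1).foldl
      (fun (st : List (Int × Int) × Int) i =>
        if PySem.List.pyGetD result i 0 ≠ PySem.List.pyGetD result (i + 1) 0 then
          (st.1 ++ [(st.2, i)], i + 1)
        else st)
      (([] : List (Int × Int)), (0 : Int))
    st.1 ++ [(st.2, n - 1)]

-- ===== PORT B =====
-- Source B's comprehension condition 'i == 0 or result[i] != result[i - 1]'
-- (indices are always in range there, so plain positive indexing getD is exact)
def pvIsStart (result : List Int) (i : Nat) : Bool :=
  i == 0 || result.getD i 0 != result.getD (i - 1) 0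

def find_segments_bounds_alt (result : List Int) : List (Int × Int) :=
  let n := result.length
  let starts := (List.range n).filter (pvIsStart result)
  (starts.zip (starts.drop 1 ++ [n])).map (fun q => ((q.1 : Int), (q.2 : Int) - 1))

-- ===== PRECONDITION & SPEC =====
def Spec_find_segments_bounds (result : List Int) (out : List (Int × Int)) : Prop := out = find_segments_bounds_alt result
instance (result : List Int) (out : List (Int × Int)) : Decidable (Spec_find_segments_bounds result out) := by unfold Spec_find_segments_bounds; infer_instance

-- ===== CLAIM (what is proved, stated in full; the proofs are below) =====
def Claim_equal_find_segments_bounds : Prop := ∀ (result : List Int), Dom_find_segments_bounds result → Spec_find_segments_bounds result (find_segments_bounds result)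

-- ===== LEMMAS AND PROOFS =====

-- proof-side description of a run scan: pvAltInner finds the end of the run of value v
-- starting before j, pvAltOuter lists the (start, end) bounds of all runs from idx on;
-- both ports are proved equal to pvAltOuter result 0.
def pvAltInner (result : List Int) (v : Int) (j : Nat) : Nat :=
  if j < result.length ∧ result.getD j 0 = v then pvAltInner result v (j + 1) else j
termination_by result.length - j
decreasing_by omega

theorem pvAltInner_ge (result : List Int) (v : Int) (j : Nat) : j ≤ pvAltInner result v j := by
  induction hfuel : result.length - j generalizing j with
  | zero =>
    rw [pvAltInner]
    split
    · next h => obtain ⟨h1, _⟩ := h; omega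
    · omega
  | succ n ih =>
    rw [pvAltInner]
    split
    · next h => have := ih (j + 1) (by omega); omega
    · omega

theorem pvAltInner_le (result : List Int) (v : Int) (j : Nat) (hj : j ≤ result.length) :
    pvAltInner result v j ≤ result.length := by
  induction hfuel : result.length - j generalizing j with
  | zero =>
    rw [pvAltInner]
    split
    · next h => omega
    · omega
  | succ n ih =>
    rw [pvAltInner]
    split
    · next h => exact ih (j + 1) (by omega) (by omega)
    · omega

theorem pvAltInner_run (result : List Int) (v : Int) (j : Nat) :
    ∀ m, j ≤ m → m < pvAltInner result v j → result.getD m 0 = v := by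
  induction hfuel : result.length - j generalizing j with
  | zero =>
    rw [pvAltInner]
    split
    · next h => omega
    · intro m h1 h2; omega
  | succ n ih =>
    rw [pvAltInner]
    split
    · next h =>
      intro m h1 h2
      rcases Nat.eq_or_lt_of_le h1 with he | hl
      · exact he ▸ h.2
      · exact ih (j + 1) (by omega) m hl h2
    · intro m h1 h2; omega

theorem pvAltInner_stop (result : List Int) (v : Int) (j : Nat) :
    ¬ (pvAltInner result v j < result.length ∧ result.getD (pvAltInner result v j) 0 = v) := by
  induction hfuel : result.length - j generalizing j with
  | zero =>
    rw [pvAltInner]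
    split
    · next h => omega
    · next h => exact h
  | succ n ih =>
    rw [pvAltInner]
    split
    · next h => exact ih (j + 1) (by omega)
    · next h => exact h

def pvAltOuter (result : List Int) (idx : Nat) : List (Int × Int) :=
  if h : idx < result.length then
    ((idx : Int), (pvAltInner result (result.getD idx 0) (idx + 1) : Int) - 1)
      :: pvAltOuter result (pvAltInner result (result.getD idx 0) (idx + 1))
  else []
termination_by result.length - idx
decreasing_by have := pvAltInner_ge result (result.getD idx 0) (idx + 1); omega

-- ---------- A's fold equals pvAltOuter ----------

theorem pvAltInner_skip (result : List Int) (v : Int) (j k : Nat)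
    (hjk : j ≤ k) (hk : k ≤ result.length)
    (heq : ∀ m, j ≤ m → m < k → result.getD m 0 = v) :
    pvAltInner result v j = pvAltInner result v k := by
  induction k with
  | zero => rw [Nat.le_zero.mp hjk]
  | succ k ih =>
    rcases Nat.eq_or_lt_of_le hjk with h | h
    · rw [h]
    · have hjk' : j ≤ k := by omega
      have hc : k < result.length ∧ result.getD k 0 = v := ⟨by omega, heq k hjk' (by omega)⟩
      have hstep : pvAltInner result v k = pvAltInner result v (k + 1) := by
        rw [pvAltInner, if_pos hc]
      rw [ih hjk' (by omega) (fun m hm1 hm2 => heq m hm1 (by omega)), hstep]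

-- main invariant: resuming A's fold at index i inside a run that started at s
-- produces exactly pvAltOuter's remaining output
theorem pv_main (result : List Int) (i s : Nat) (segs : List (Int × Int))
    (hsi : s ≤ i) (hi : i < result.length)
    (hrun : ∀ m, s ≤ m → m ≤ i → result.getD m 0 = result.getD s 0) :
    (fun st : List (Int × Int) × Int => st.1 ++ [(st.2, (result.length : Int) - 1)])
      ((PySem.List.pyRange (i : Int) ((result.length : Int) - 1) 1).foldl
        (fun (st : List (Int × Int) × Int) q =>
          if PySem.List.pyGetD result q 0 ≠ PySem.List.pyGetD result (q + 1) 0 then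
            (st.1 ++ [(st.2, q)], q + 1)
          else st)
        (segs, (s : Int)))
    = segs ++ pvAltOuter result s := by
  induction hfuel : result.length - 1 - i generalizing i s segs with
  | zero =>
    rw [PySem.List.pyRange_one_eq_nil (by omega)]
    simp only [List.foldl_nil]
    have hskip : pvAltInner result (result.getD s 0) (s + 1)
        = pvAltInner result (result.getD s 0) (i + 1) :=
      pvAltInner_skip result _ (s + 1) (i + 1) (by omega) (by omega)
        (fun m h1 h2 => hrun m (by omega) (by omega))
    have hend : pvAltInner result (result.getD s 0) (i + 1) = i + 1 := by
      rw [pvAltInner, if_neg]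
      intro hc
      omega
    rw [pvAltOuter, dif_pos (show s < result.length by omega), hskip, hend,
      pvAltOuter, dif_neg (show ¬ i + 1 < result.length by omega)]
    simp
    omega
  | succ n ih =>
    rw [PySem.List.pyRange_one_cons (by omega)]
    simp only [List.foldl_cons]
    have hget : PySem.List.pyGetD result (i : Int) 0 = result.getD i 0 :=
      PySem.List.pyGetD_natCast ..
    have hcast : (i : Int) + 1 = ((i + 1 : Nat) : Int) := by push_cast; ring
    have hget1 : PySem.List.pyGetD result ((i : Int) + 1) 0 = result.getD (i + 1) 0 := by
      rw [hcast, PySem.List.pyGetD_natCast]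
    by_cases hne : result.getD i 0 ≠ result.getD (i + 1) 0
    · rw [hget, hget1, if_pos hne, hcast]
      have h2 := ih (i + 1) (i + 1) (segs ++ [((s : Int), (i : Int))]) (le_refl _) (by omega)
        (fun m hm1 hm2 => by simp [show m = i + 1 from by omega]) (by omega)
      simp only [] at h2
      rw [h2]
      have hv : result.getD i 0 = result.getD s 0 := hrun i hsi (le_refl i)
      have hend : pvAltInner result (result.getD s 0) (i + 1) = i + 1 := by
        rw [pvAltInner, if_neg]
        intro hc
        exact hne (by rw [hv, hc.2])
      have hskip : pvAltInner result (result.getD s 0) (s + 1)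
          = pvAltInner result (result.getD s 0) (i + 1) :=
        pvAltInner_skip result _ (s + 1) (i + 1) (by omega) (by omega)
          (fun m h1 h2 => hrun m (by omega) (by omega))
      conv_rhs => rw [pvAltOuter]
      rw [dif_pos (show s < result.length by omega), hskip, hend]
      push_cast
      simp
    · rw [hget, hget1, if_neg hne, hcast]
      rw [not_ne_iff] at hne
      exact ih (i + 1) s segs (by omega) (by omega)
        (fun m h1 h2 => by
          rcases Nat.lt_or_ge m (i + 1) with h | h
          · exact hrun m h1 (by omega)
          · have hm : m = i + 1 := by omega
            rw [hm, ← hne]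
            exact hrun i (by omega) (le_refl i))
        (by omega)

-- ---------- B's zip of the start list equals pvAltOuter ----------

-- B's pairing step, as a function of the start list
def pvG (result : List Int) (l : List Nat) : List (Int × Int) :=
  (l.zip (l.drop 1 ++ [result.length])).map (fun q => ((q.1 : Int), (q.2 : Int) - 1))

theorem pvG_cons (result : List Int) (a : Nat) (l : List Nat) :
    pvG result (a :: l)
      = ((a : Int), ((l.headD result.length : Nat) : Int) - 1) :: pvG result l := by
  cases l <;> simp [pvG]

-- between two consecutive run starts the filter keeps nothing
theorem pv_filter_skip (result : List Int) (s : Nat) (hs : s < result.length) :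
    ∀ fuel k, pvAltInner result (result.getD s 0) (s + 1) - k ≤ fuel →
      s < k → k ≤ pvAltInner result (result.getD s 0) (s + 1) →
      (List.range' k (result.length - k)).filter (pvIsStart result)
        = (List.range' (pvAltInner result (result.getD s 0) (s + 1))
            (result.length - pvAltInner result (result.getD s 0) (s + 1))).filter (pvIsStart result) := by
  intro fuel
  induction fuel with
  | zero =>
    intro k h1 h2 h3
    have : k = pvAltInner result (result.getD s 0) (s + 1) := by omega
    rw [this]
  | succ n ih =>
    intro k h1 h2 h3
    rcases Nat.eq_or_lt_of_le h3 with he | hl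
    · rw [he]
    · have hjle : pvAltInner result (result.getD s 0) (s + 1) ≤ result.length :=
        pvAltInner_le result _ (s + 1) (by omega)
      have hkn : k < result.length := by omega
      have hkv : result.getD k 0 = result.getD s 0 :=
        pvAltInner_run result _ (s + 1) k (by omega) hl
      have hk1v : result.getD (k - 1) 0 = result.getD s 0 := by
        rcases Nat.eq_or_lt_of_le (show s ≤ k - 1 by omega) with he' | hl'
        · rw [← he']
        · exact pvAltInner_run result _ (s + 1) (k - 1) (by omega) (by omega)
      have hpk : pvIsStart result k = false := by
        unfold pvIsStart
        rw [hkv, hk1v]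
        simp
        omega
      have hrw : result.length - k = (result.length - (k + 1)) + 1 := by omega
      rw [hrw, List.range'_succ, List.filter_cons, hpk]
      simp only [Bool.false_eq_true, if_false]
      exact ih (k + 1) (by omega) (by omega) hl

-- main B-side invariant: from any run start s, pairing the remaining start list
-- gives exactly pvAltOuter result s
theorem pvB_main (result : List Int) :
    ∀ fuel s, result.length - s ≤ fuel → s < result.length → pvIsStart result s = true →
      pvG result ((List.range' s (result.length - s)).filter (pvIsStart result))
        = pvAltOuter result s := by
  intro fuel
  induction fuel with
  | zero => intro s h1 h2 _; omega
  | succ n ih =>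
    intro s h1 h2 hps
    have hge : s + 1 ≤ pvAltInner result (result.getD s 0) (s + 1) := pvAltInner_ge ..
    have hle : pvAltInner result (result.getD s 0) (s + 1) ≤ result.length :=
      pvAltInner_le result _ (s + 1) (by omega)
    set j := pvAltInner result (result.getD s 0) (s + 1) with hj
    have hrw : result.length - s = (result.length - (s + 1)) + 1 := by omega
    have hhead : (List.range' s (result.length - s)).filter (pvIsStart result)
        = s :: (List.range' j (result.length - j)).filter (pvIsStart result) := by
      rw [hrw, List.range'_succ, List.filter_cons, hps]
      simp only [if_true]
      congr 1
      exact pv_filter_skip result s h2 (j - (s + 1)) (s + 1) (by omega) (by omega) hge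
    rw [hhead]
    have houter : pvAltOuter result s
        = ((s : Int), (j : Int) - 1) :: pvAltOuter result j := by
      rw [pvAltOuter, dif_pos h2]
    rcases Nat.eq_or_lt_of_le hle with hjn | hjn
    · -- last run: j = length
      have hnil : (List.range' j (result.length - j)).filter (pvIsStart result) = [] := by
        rw [hjn]
        simp
      rw [hnil, houter, pvAltOuter, dif_neg (by omega)]
      rw [pvG_cons]
      simp [pvG, hjn]
    · -- another run follows at j
      have hstop := pvAltInner_stop result (result.getD s 0) (s + 1)
      rw [← hj] at hstop
      have hjv : result.getD j 0 ≠ result.getD s 0 := by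
        intro hc; exact hstop ⟨hjn, hc⟩
      have hj1v : result.getD (j - 1) 0 = result.getD s 0 := by
        rcases Nat.eq_or_lt_of_le hge with he | hl
        · rw [show j - 1 = s from by omega]
        · exact pvAltInner_run result _ (s + 1) (j - 1) (by omega) (by omega)
      have hpj : pvIsStart result j = true := by
        unfold pvIsStart
        rw [hj1v]
        simp only [Bool.or_eq_true, beq_iff_eq, bne_iff_ne, ne_eq]
        exact Or.inr hjv
      have htl : (List.range' j (result.length - j)).filter (pvIsStart result)
          = j :: (List.range' (j + 1) (result.length - (j + 1))).filter (pvIsStart result) := by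
        rw [show result.length - j = (result.length - (j + 1)) + 1 from by omega,
          List.range'_succ, List.filter_cons, hpj]
        simp only [if_true]
      have hih := ih j (by omega) hjn hpj
      rw [htl] at hih ⊢
      rw [pvG_cons, hih, houter]
      simp

-- ===== VERDICT (by name: the statement is the Claim_ definition above) =====
theorem find_segments_bounds_spec : Claim_equal_find_segments_bounds := by
  intro result _
  unfold Spec_find_segments_bounds
  by_cases hres : result = []
  · subst hres
    decide
  · have hlen : 0 < result.length := List.length_pos_iff.mpr hres
    have hA : find_segments_bounds result = pvAltOuter result 0 := by
      unfold find_segments_bounds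
      rw [if_neg hres]
      have h := pv_main result 0 0 [] (le_refl 0) hlen
        (fun m hm1 hm2 => by rw [Nat.le_zero.mp hm2])
      simpa using h
    have hB : find_segments_bounds_alt result = pvAltOuter result 0 := by
      have hp0 : pvIsStart result 0 = true := by simp [pvIsStart]
      have hdef : find_segments_bounds_alt result
          = pvG result ((List.range result.length).filter (pvIsStart result)) := rfl
      rw [hdef, List.range_eq_range']
      simpa using pvB_main result result.length 0 (by omega) hlen hp0
    rw [hA, hB]
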